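-- pv_equiv track=rewrite | github.com/mad3310/beehive | src/api/common/resourceVerify.py | get_host_ip_list
-- ===== SOURCE A (Python) =====
-- def get_host_ip_list(host_ip_list, container_num):
--
--     hostip_num_dict, ip_list = {}, []
--
--     for i in range(container_num):
--         for index,(host_ip, available_host_num) in enumerate(host_ip_list):
--             if available_host_num > 0:
--                 ip_list.append(host_ip)
--                 host_ip_list[index] = (host_ip, available_host_num - 1)
--             if len(ip_list) == container_num:
--                 return ip_list
--     return ip_list
-- ===== SOURCE B (Python) =====
-- def get_host_ip_list(host_ip_list, container_num):
--     # Round-robin like A, but: the first round is a single filtered pass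
--     # (truncated exactly where A stops); later rounds are emitted as whole
--     # blocks of identical rounds (seq * t) between depletion events, found
--     # via the sorted distinct capacities; only still-available hosts are
--     # kept between blocks, and the emission sequence is reused while no
--     # host is dropped. Does NOT mutate host_ip_list (A does); the return
--     # value is identical.
--     if container_num <= 0:
--         return []
--     out = [p[0] for p in host_ip_list if p[1] > 0]
--     if len(out) >= container_num:
--         del out[container_num:]
--         return out
--     caps = [p for p in host_ip_list if p[1] > 1]
--     seq = out[:] if len(caps) == len(out) else [p[0] for p in caps]
--     levels = None
--     j = 0
--     r = 1
--     while r < container_num and caps: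
--         need = container_num - len(out)
--         t = min(-(-need // len(caps)), container_num - r)
--         if t > 1:
--             if levels is None:
--                 levels = sorted(set(p[1] for p in caps))
--             while levels[j] <= r:
--                 j += 1
--             t = min(t, levels[j] - r)
--         out += seq * t
--         if len(out) >= container_num:
--             del out[container_num:]
--             return out
--         r += t
--         newcaps = [p for p in caps if p[1] > r]
--         if len(newcaps) != len(caps):
--             seq = [p[0] for p in newcaps]
--         caps = newcaps
--     return out
-- ===== Notes on version B (the rewrite author's own statement) =====
-- stated objective: faster
-- what changed: B replaces A's per-container rescan of the whole host list with one filtered pass for the first round and then emits whole blocks of identical rounds (seq * t) between depletion events, keeping only still-available hosts between blocks; B also does not mutate host_ip_list (the return value is identical).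
import Mathlib
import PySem

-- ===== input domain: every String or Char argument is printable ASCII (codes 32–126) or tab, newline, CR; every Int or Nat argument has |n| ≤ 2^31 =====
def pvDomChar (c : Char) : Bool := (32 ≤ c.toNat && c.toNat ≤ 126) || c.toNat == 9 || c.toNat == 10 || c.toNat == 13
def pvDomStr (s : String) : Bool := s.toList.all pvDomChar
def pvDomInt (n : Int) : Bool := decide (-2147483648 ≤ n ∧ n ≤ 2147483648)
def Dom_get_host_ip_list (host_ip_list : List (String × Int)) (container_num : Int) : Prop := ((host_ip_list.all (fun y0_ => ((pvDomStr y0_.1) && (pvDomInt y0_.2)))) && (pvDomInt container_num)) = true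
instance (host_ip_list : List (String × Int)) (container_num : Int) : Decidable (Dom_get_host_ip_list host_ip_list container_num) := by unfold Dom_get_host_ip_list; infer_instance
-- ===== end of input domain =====

-- B emits whole blocks of identical round-robin rounds between depletion events
-- instead of rescanning every host on every round (A rescans all hosts each round).
-- A mutates host_ip_list in place; B does not — the equivalence proved here is
-- about the RETURN value only.

-- ===== PORT A =====
-- inner `for index,(host_ip, available_host_num) in enumerate(host_ip_list)` loop:
-- returns (updated hosts, ip_list, early-return flag)
def innerA (cn : Int) : List (String × Int) → List String → (List (String × Int) × List String × Bool)
  | [], ips => ([], ips, false)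
  | (ip, n) :: rest, ips =>
    let (entry, ips') := if n > 0 then ((ip, n - 1), ips ++ [ip]) else ((ip, n), ips)
    if (ips'.length : Int) = cn then (entry :: rest, ips', true)
    else
      let res := innerA cn rest ips'
      (entry :: res.1, res.2.1, res.2.2)

-- outer `for i in range(container_num)` loop, counted down by fuel = container_num.toNat
def outerA (cn : Int) : Nat → List (String × Int) → List String → List String
  | 0, _, ips => ips
  | fuel+1, hosts, ips =>
    let res := innerA cn hosts ips
    if res.2.2 then res.2.1 else outerA cn fuel res.1 res.2.1

def get_host_ip_list (host_ip_list : List (String × Int)) (container_num : Int) : List String :=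
  outerA container_num container_num.toNat host_ip_list []

-- ===== PORT B =====
-- `while levels[j] <= r: j += 1` (fuel = len(levels) only makes the loop total;
-- on admitted inputs the scan stops inside the list exactly as Python's does)
def advJ (L : List Int) (r : Int) : Nat → Nat → Nat
  | 0, j => j
  | fuel+1, j => if L.getD j 0 ≤ r then advJ L r fuel (j + 1) else j

-- `if t > 1: (levels computed if None; while levels[j] <= r: j += 1; t = min(t, levels[j]-r))`
def chooseT (caps : List (String × Int)) (lv : Option (List Int)) (j : Nat) (r t0 : Int) :
    Int × Option (List Int) × Nat :=
  if t0 > 1 then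
    let L := lv.getD (PySem.List.sorted (PySem.Set.ofList (caps.map Prod.snd)) (fun x => x) false)
    let j' := advJ L r L.length j
    (min t0 (L.getD j' 0 - r), some L, j')
  else (t0, lv, j)

-- the `while r < container_num and caps` loop; every block advances r by t ≥ 1,
-- so fuel = container_num.toNat only makes the recursion total
def loopBn (cn : Int) : Nat → List (String × Int) → List String → List String → Option (List Int) → Nat → Int → List String
  | 0, _, out, _, _, _, _ => out
  | fuel+1, caps, out, seq, lv, j, r =>
    if r < cn ∧ caps ≠ [] then
      let need := cn - (out.length : Int)
      let t0 := min (-(PySem.Int.floordiv (-need) (caps.length : Int))) (cn - r)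
      let tl := chooseT caps lv j r t0
      let out' := out ++ (List.replicate tl.1.toNat seq).flatten
      if cn ≤ (out'.length : Int) then out'.take cn.toNat
      else
        let newcaps := caps.filter (fun p => p.2 > r + tl.1)
        let seq' := if newcaps.length ≠ caps.length then newcaps.map Prod.fst else seq
        loopBn cn fuel newcaps out' seq' tl.2.1 tl.2.2 (r + tl.1)
    else out

def get_host_ip_list_alt (host_ip_list : List (String × Int)) (container_num : Int) : List String :=
  if container_num ≤ 0 then []
  else
    let out := (host_ip_list.filter (fun p => p.2 > 0)).map Prod.fst
    if container_num ≤ (out.length : Int) then out.take container_num.toNat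
    else
      let caps := host_ip_list.filter (fun p => p.2 > 1)
      let seq := if caps.length = out.length then out else caps.map Prod.fst
      loopBn container_num container_num.toNat caps out seq none 0 1

-- ===== PRECONDITION & SPEC =====
def Spec_get_host_ip_list (host_ip_list : List (String × Int)) (container_num : Int) (out : List String) : Prop := out = get_host_ip_list_alt host_ip_list container_num
instance (host_ip_list : List (String × Int)) (container_num : Int) (out : List String) : Decidable (Spec_get_host_ip_list host_ip_list container_num out) := by unfold Spec_get_host_ip_list; infer_instance

-- ===== CLAIM (what is proved, stated in full; the proofs are below) =====
def Claim_equal_get_host_ip_list : Prop := ∀ (host_ip_list : List (String × Int)) (container_num : Int), Dom_get_host_ip_list host_ip_list container_num → Spec_get_host_ip_list host_ip_list container_num (get_host_ip_list host_ip_list container_num)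

-- ===== LEMMAS AND PROOFS =====

-- proof-side intermediate program: the straightforward one-round-at-a-time loop;
-- A is proved equal to it (main_eq), and loopBn is proved to compress its rounds.
-- the `for ip, _ in caps` loop with its early return
def emitB (cn : Int) : List (String × Int) → List String → (List String × Bool)
  | [], out => (out, false)
  | (ip, _) :: rest, out =>
    let out' := out ++ [ip]
    if (out'.length : Int) = cn then (out', true)
    else emitB cn rest out'

-- the `while` loop; fuel = container_num.toNat enforces `r < container_num`
def loopB (cn : Int) : Nat → List (String × Int) → List String → Int → List String
  | 0, _, out, _ => out
  | fuel+1, caps, out, r =>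
    if (out.length : Int) < cn && !caps.isEmpty then
      match emitB cn caps out with
      | (out', true) => out'
      | (out', false) => loopB cn fuel (caps.filter (fun p => p.2 > r + 1)) out' (r + 1)
    else out


-- one A-round decrements every positive capacity
def decA (hosts : List (String × Int)) : List (String × Int) :=
  hosts.map (fun p => if p.2 > 0 then (p.1, p.2 - 1) else p)

-- B's cap list after r rounds, expressed from A's current hosts
def Fcaps (r : Int) (hosts : List (String × Int)) : List (String × Int) :=
  (hosts.filter (fun p => p.2 > 0)).map (fun p => (p.1, p.2 + r))

theorem emitB_fst_congr (cn : Int) : ∀ (c1 c2 : List (String × Int)) (out : List String),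
    c1.map Prod.fst = c2.map Prod.fst → emitB cn c1 out = emitB cn c2 out := by
  intro c1
  induction c1 with
  | nil => intro c2 out h; cases c2 <;> simp_all [emitB]
  | cons p rest ih =>
    intro c2 out h
    cases c2 with
    | nil => simp at h
    | cons q rest2 =>
      obtain ⟨p1, p2⟩ := p; obtain ⟨q1, q2⟩ := q
      simp at h
      obtain ⟨h1, h2⟩ := h
      subst h1
      simp only [emitB]
      split
      · rfl
      · exact ih rest2 _ h2

theorem emitB_len (cn : Int) : ∀ (caps : List (String × Int)) (out : List String),
    (out.length : Int) < cn → (emitB cn caps out).2 = false →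
    ((emitB cn caps out).1.length : Int) < cn := by
  intro caps
  induction caps with
  | nil => intro out h _; simpa [emitB] using h
  | cons p rest ih =>
    intro out h hf
    obtain ⟨p1, p2⟩ := p
    simp only [emitB] at hf ⊢
    by_cases hc : ((out ++ [p1]).length : Int) = cn
    · rw [if_pos hc] at hf; simp at hf
    · rw [if_neg hc] at hf ⊢
      exact ih _ (by simp at hc ⊢; omega) hf

theorem innerA_eq (cn : Int) : ∀ (hosts : List (String × Int)) (ips : List String),
    (ips.length : Int) < cn →
    (innerA cn hosts ips).2 = emitB cn (hosts.filter (fun p => p.2 > 0)) ips := by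
  intro hosts
  induction hosts with
  | nil => intro ips h; simp [innerA, emitB]
  | cons p rest ih =>
    intro ips h
    obtain ⟨p1, p2⟩ := p
    by_cases hp : p2 > 0
    · simp only [innerA, if_pos hp, List.filter_cons, decide_eq_true hp, if_true, emitB]
      by_cases hc : ((ips ++ [p1]).length : Int) = cn
      · rw [if_pos hc, if_pos hc]
      · rw [if_neg hc, if_neg hc]
        exact ih _ (by simp at hc ⊢; omega)
    · simp only [innerA, if_neg hp, List.filter_cons, decide_eq_false hp, Bool.false_eq_true,
        if_false]
      rw [if_neg (by omega)]
      exact ih _ h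

theorem innerA_hosts (cn : Int) : ∀ (hosts : List (String × Int)) (ips : List String),
    (ips.length : Int) < cn → (innerA cn hosts ips).2.2 = false →
    (innerA cn hosts ips).1 = decA hosts := by
  intro hosts
  induction hosts with
  | nil => intro ips _ _; simp [innerA, decA]
  | cons p rest ih =>
    intro ips h hf
    obtain ⟨p1, p2⟩ := p
    by_cases hp : p2 > 0
    · simp only [innerA, if_pos hp] at hf ⊢
      by_cases hc : ((ips ++ [p1]).length : Int) = cn
      · rw [if_pos hc] at hf; simp at hf
      · rw [if_neg hc] at hf ⊢
        simp only [decA, List.map_cons, if_pos hp, List.cons.injEq, true_and]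
        exact ih _ (by simp at hc ⊢; omega) hf
    · simp only [innerA, if_neg hp] at hf ⊢
      rw [if_neg (by omega)] at hf ⊢
      simp only [decA, List.map_cons, if_neg hp, List.cons.injEq, true_and]
      exact ih _ h hf

theorem Fcaps_fst (r : Int) (hosts : List (String × Int)) :
    (Fcaps r hosts).map Prod.fst = (hosts.filter (fun p => p.2 > 0)).map Prod.fst := by
  simp [Fcaps, List.map_map]

theorem Fcaps_step (r : Int) (hosts : List (String × Int)) :
    (Fcaps r hosts).filter (fun p => p.2 > r + 1) = Fcaps (r + 1) (decA hosts) := by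
  induction hosts with
  | nil => simp [Fcaps, decA]
  | cons p rest ih =>
    obtain ⟨p1, p2⟩ := p
    by_cases hp : p2 > 0
    · by_cases hp1 : p2 > 1
      · have h1 : (p2 + r : Int) > r + 1 := by omega
        simp only [Fcaps, decA] at ih ⊢
        simp [hp, hp1, h1] at ih ⊢
        exact ih
      · have h1 : ¬((p2 + r : Int) > r + 1) := by omega
        simp only [Fcaps, decA] at ih ⊢
        simp [hp, hp1, h1] at ih ⊢
        exact ih
    · simp only [Fcaps, decA] at ih ⊢
      simp [hp] at ih ⊢
      exact ih

theorem decA_nopos (hosts : List (String × Int))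
    (h : hosts.filter (fun p => p.2 > 0) = []) : decA hosts = hosts := by
  induction hosts with
  | nil => rfl
  | cons p rest ih =>
    obtain ⟨p1, p2⟩ := p
    simp only [List.filter_cons] at h
    split at h
    · simp at h
    · rename_i hp
      simp only [decA, List.map_cons]
      rw [if_neg (by simpa using hp)]
      simp only [List.cons.injEq, true_and]
      exact ih h

theorem outerA_nopos (cn : Int) : ∀ (fuel : Nat) (hosts : List (String × Int)) (ips : List String),
    hosts.filter (fun p => p.2 > 0) = [] → (ips.length : Int) < cn →
    outerA cn fuel hosts ips = ips := by
  intro fuel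
  induction fuel with
  | zero => intro hosts ips _ _; rfl
  | succ k ih =>
    intro hosts ips hf hl
    have he : (innerA cn hosts ips).2 = (ips, false) := by
      rw [innerA_eq cn hosts ips hl, hf]; rfl
    have hh : (innerA cn hosts ips).1 = hosts := by
      rw [innerA_hosts cn hosts ips hl (by rw [he])]
      exact decA_nopos hosts hf
    simp only [outerA, he, hh]
    exact ih hosts ips hf hl

theorem main_eq (cn : Int) : ∀ (fuel : Nat) (hosts : List (String × Int)) (ips : List String) (r : Int),
    (ips.length : Int) < cn →
    outerA cn fuel hosts ips = loopB cn fuel (Fcaps r hosts) ips r := by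
  intro fuel
  induction fuel with
  | zero => intro hosts ips r _; rfl
  | succ k ih =>
    intro hosts ips r hl
    by_cases hf : hosts.filter (fun p => p.2 > 0) = []
    · have hc : Fcaps r hosts = [] := by simp [Fcaps, hf]
      rw [outerA_nopos cn (k+1) hosts ips hf hl]
      simp [loopB, hc]
    · have hcne : (Fcaps r hosts).isEmpty = false := by
        rcases hfe : hosts.filter (fun p => p.2 > 0) with _ | ⟨q, qs⟩
        · exact absurd hfe hf
        · simp [Fcaps, hfe]
      have hemit : emitB cn (Fcaps r hosts) ips = emitB cn (hosts.filter (fun p => p.2 > 0)) ips :=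
        emitB_fst_congr cn _ _ ips (Fcaps_fst r hosts)
      have hinner : (innerA cn hosts ips).2 = emitB cn (Fcaps r hosts) ips := by
        rw [innerA_eq cn hosts ips hl, hemit]
      simp only [loopB, hcne, Bool.not_false, Bool.and_true, decide_eq_true_eq]
      rw [if_pos hl]
      rcases he : emitB cn (Fcaps r hosts) ips with ⟨out', d⟩
      cases d with
      | true =>
        simp [outerA, hinner, he]
      | false =>
        have hdone : (innerA cn hosts ips).2.2 = false := by rw [hinner, he]
        have hout : (innerA cn hosts ips).2.1 = out' := by rw [hinner, he]
        have hhost : (innerA cn hosts ips).1 = decA hosts := innerA_hosts cn hosts ips hl hdone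
        have hlen : (out'.length : Int) < cn := by
          have := emitB_len cn (Fcaps r hosts) ips hl (by rw [he])
          rwa [he] at this
        simp only [outerA, hdone, hout, hhost, if_false, Bool.false_eq_true]
        rw [Fcaps_step r hosts]
        exact ih (decA hosts) out' (r + 1) hlen

theorem Fcaps_zero (hosts : List (String × Int)) :
    Fcaps 0 hosts = hosts.filter (fun p => p.2 > 0) := by
  simp [Fcaps]


-- ---------- new lemmas: loopBn compresses loopB's rounds ----------

theorem loopB_nil (cn : Int) (fuel : Nat) (out : List String) (r : Int) :
    loopB cn fuel [] out r = out := by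
  cases fuel <;> simp [loopB]

theorem emitB_closed (cn : Int) : ∀ (caps : List (String × Int)) (out : List String),
    (out.length : Int) < cn →
    emitB cn caps out =
      if cn ≤ (out.length : Int) + caps.length then
        ((out ++ caps.map Prod.fst).take cn.toNat, true)
      else (out ++ caps.map Prod.fst, false) := by
  intro caps
  induction caps with
  | nil =>
    intro out h
    rw [if_neg (by simp; omega)]
    simp [emitB]
  | cons p rest ih =>
    intro out h
    obtain ⟨p1, p2⟩ := p
    simp only [emitB]
    by_cases hc : ((out ++ [p1]).length : Int) = cn
    · rw [if_pos hc, if_pos (by simp at hc ⊢; omega)]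
      have hlen : cn.toNat ≤ (out ++ [p1]).length := by simp at hc ⊢; omega
      rw [List.map_cons, show out ++ (p1 :: rest.map Prod.fst) = (out ++ [p1]) ++ rest.map Prod.fst by simp,
        List.take_append_of_le_length hlen]
      have : (out ++ [p1]).take cn.toNat = out ++ [p1] := by
        apply List.take_of_length_le
        simp at hc ⊢; omega
      rw [this]
    · rw [if_neg hc, ih _ (by simp at hc ⊢; omega)]
      have harr : out ++ [p1] ++ rest.map Prod.fst = out ++ (p1 :: rest.map Prod.fst) := by simp
      by_cases hfill : cn ≤ (out.length : Int) + (((p1, p2) :: rest).length : Int)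
      · rw [if_pos (by simp at hfill ⊢; omega), if_pos hfill]
        rw [List.map_cons, harr]
      · rw [if_neg (by simp at hfill ⊢; omega), if_neg hfill]
        rw [List.map_cons, harr]

theorem loopB_block (cn : Int) : ∀ (k fuelO : Nat) (caps : List (String × Int)) (out : List String) (r : Int),
    0 < k → k ≤ fuelO → caps ≠ [] → (out.length : Int) < cn →
    (∀ p ∈ caps, (r + k : Int) ≤ p.2) →
    loopB cn fuelO caps out r =
      if cn ≤ (out.length : Int) + k * caps.length then
        (out ++ (List.replicate k (caps.map Prod.fst)).flatten).take cn.toNat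
      else
        loopB cn (fuelO - k) (caps.filter (fun p => p.2 > r + k))
          (out ++ (List.replicate k (caps.map Prod.fst)).flatten) (r + k) := by
  intro k
  induction k with
  | zero => intro fuelO caps out r hk; omega
  | succ n ih =>
    intro fuelO caps out r _ hfuel hcne hout hcap
    obtain ⟨f, rfl⟩ : ∃ f, fuelO = f + 1 := ⟨fuelO - 1, by omega⟩
    have hlen0 : (0 : Int) ≤ caps.length := by positivity
    have hmul : (caps.length : Int) ≤ ((n + 1 : Nat) : Int) * caps.length := by
      apply le_mul_of_one_le_left hlen0
      push_cast; omega
    have hcond : ((out.length : Int) < cn && !caps.isEmpty) = true := by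
      simp [hout, hcne]
    simp only [loopB, hcond, if_true]
    rw [emitB_closed cn caps out hout]
    by_cases hfill1 : cn ≤ (out.length : Int) + caps.length
    · -- the very first round already fills: both sides truncate at cn
      rw [if_pos hfill1, if_pos (by linarith)]
      show (out ++ caps.map Prod.fst).take cn.toNat = _
      have htr : (out ++ (List.replicate (n + 1) (caps.map Prod.fst)).flatten).take cn.toNat
          = (out ++ caps.map Prod.fst).take cn.toNat := by
        rw [List.replicate_succ, List.flatten_cons, ← List.append_assoc]
        exact List.take_append_of_le_length (by simp; omega)
      rw [htr]
    · rw [if_neg hfill1]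
      show loopB cn f (caps.filter (fun p => p.2 > r + 1)) (out ++ caps.map Prod.fst) (r + 1) = _
      rcases Nat.eq_zero_or_pos n with hn | hn
      · -- k = 1 : exactly one round
        subst hn
        rw [if_neg (by push_cast; omega)]
        simp
      · -- k = n + 1 with n ≥ 1 : the first round keeps every host
        have hid : caps.filter (fun p => p.2 > r + 1) = caps := by
          apply List.filter_eq_self.mpr
          intro p hp
          have := hcap p hp
          push_cast at this
          simp; omega
        rw [hid]
        rw [ih f caps (out ++ caps.map Prod.fst) (r + 1) (by omega) (by omega) hcne
          (by simp; omega) (by intro p hp; have := hcap p hp; push_cast at this ⊢; omega)]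
        have harr : (out ++ caps.map Prod.fst) ++ (List.replicate n (caps.map Prod.fst)).flatten
            = out ++ (List.replicate (n + 1) (caps.map Prod.fst)).flatten := by
          simp [List.replicate_succ]
        have hcnd : ((out ++ caps.map Prod.fst).length : Int) + (n : Nat) * caps.length
            = (out.length : Int) + ((n + 1 : Nat)) * caps.length := by
          simp only [List.length_append, List.length_map]
          push_cast
          ring
        rw [hcnd, harr]
        by_cases hf2 : cn ≤ (out.length : Int) + ((n + 1 : Nat)) * caps.length
        · rw [if_pos hf2, if_pos hf2]
        · rw [if_neg hf2, if_neg hf2]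
          have hfu : f - n = f + 1 - (n + 1) := by omega
          have hfe : (fun p : String × Int => decide (p.2 > (r + 1) + (n : Nat)))
              = (fun p : String × Int => decide (p.2 > r + ((n + 1 : Nat) : Int))) := by
            funext p
            have : (r + 1) + ((n : Nat) : Int) = r + ((n + 1 : Nat) : Int) := by push_cast; ring
            rw [this]
          have hre : (r + 1) + ((n : Nat) : Int) = r + ((n + 1 : Nat) : Int) := by push_cast; ring
          rw [hfu, hfe, hre]

theorem advJ_spec (L : List Int) (r : Int) :
    ∀ (fuel j : Nat), (∀ i < j, L.getD i 0 ≤ r) → (∃ i, ∃ h : i < L.length, r < L[i]) →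
    L.length - j ≤ fuel →
    advJ L r fuel j < L.length ∧ r < L.getD (advJ L r fuel j) 0 ∧
      (∀ i < advJ L r fuel j, L.getD i 0 ≤ r) := by
  intro fuel
  induction fuel with
  | zero =>
    intro j hpre hex hfuel
    exfalso
    obtain ⟨i, hi, hri⟩ := hex
    have := hpre i (by omega)
    rw [List.getD_eq_getElem?_getD, List.getElem?_eq_getElem hi] at this
    simp at this
    omega
  | succ fuel ih =>
    intro j hpre hex hfuel
    have hjlt : j < L.length := by
      by_contra hge
      obtain ⟨i, hi, hri⟩ := hex
      have := hpre i (by omega)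
      rw [List.getD_eq_getElem?_getD, List.getElem?_eq_getElem hi] at this
      simp at this
      omega
    simp only [advJ]
    by_cases hle : L.getD j 0 ≤ r
    · rw [if_pos hle]
      exact ih (j + 1) (by intro i hij; rcases Nat.lt_succ_iff_lt_or_eq.mp hij with h | h
                           · exact hpre i h
                           · subst h; exact hle) hex (by omega)
    · rw [if_neg hle]
      refine ⟨hjlt, by omega, hpre⟩

theorem loopBn_nil (cn : Int) (fuel : Nat) (out seq : List String) (lv : Option (List Int)) (j : Nat) (r : Int) :
    loopBn cn fuel [] out seq lv j r = out := by
  cases fuel <;> simp [loopBn]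

-- a reused emission sequence is always the ip list of the still-available hosts
theorem seq_keep (caps : List (String × Int)) (pred : String × Int → Bool) :
    (if (caps.filter pred).length ≠ caps.length then (caps.filter pred).map Prod.fst
     else caps.map Prod.fst) = (caps.filter pred).map Prod.fst := by
  by_cases h : (caps.filter pred).length ≠ caps.length
  · rw [if_pos h]
  · rw [if_neg h]
    have heq : caps.filter pred = caps :=
      List.filter_sublist.eq_of_length (by omega)
    rw [heq]

-- the invariant carried for the lazily computed `levels`
def LInv (lv : Option (List Int)) (j : Nat) (r : Int) (caps : List (String × Int)) : Prop :=
  match lv with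
  | none => j = 0
  | some L => L.Pairwise (· < ·) ∧ (∀ p ∈ caps, p.2 ∈ L) ∧ (∀ i < j, L.getD i 0 ≤ r)

theorem bridge (cn : Int) : ∀ (fuelN : Nat) (caps : List (String × Int)) (out seq : List String)
    (lv : Option (List Int)) (j : Nat) (r : Int),
    seq = caps.map Prod.fst →
    1 ≤ r → (cn - r).toNat ≤ fuelN → (out.length : Int) < cn →
    (∀ p ∈ caps, r < p.2) → LInv lv j r caps →
    loopBn cn fuelN caps out seq lv j r = loopB cn (cn - r).toNat caps out r := by
  intro fuelN
  induction fuelN with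
  | zero =>
    intro caps out seq lv j r _ _ hf _ _ _
    have h0 : (cn - r).toNat = 0 := by omega
    rw [h0]
    rfl
  | succ fuel ih =>
    intro caps out seq lv j r hseq hr hf hout hcaps hinv
    subst hseq
    by_cases hcond : r < cn ∧ caps ≠ []
    · obtain ⟨hrc, hcne⟩ := hcond
      have hlpos : (0 : Int) < caps.length := by
        cases caps with
        | nil => exact absurd rfl hcne
        | cons a l => simp
      have hneed1 : 1 ≤ cn - (out.length : Int) := by omega
      have hchar := (PySem.Int.neg_floordiv_neg_eq_iff_of_pos
        (a := cn - (out.length : Int))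
        (q := -(PySem.Int.floordiv (-(cn - (out.length : Int))) (caps.length : Int))) hlpos).mp rfl
      have htf1 : 1 ≤ -(PySem.Int.floordiv (-(cn - (out.length : Int))) (caps.length : Int)) := by
        by_contra hcon
        have h0 : -(PySem.Int.floordiv (-(cn - (out.length : Int))) (caps.length : Int)) ≤ 0 := by omega
        have h1 := mul_le_mul_of_nonneg_right h0 (le_of_lt hlpos)
        rw [zero_mul] at h1
        linarith [hchar.2]
      have ht01 : 1 ≤ min (-(PySem.Int.floordiv (-(cn - (out.length : Int))) (caps.length : Int))) (cn - r) :=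
        le_min htf1 (by omega)
      -- one block of t rounds, for any admissible t
      have key : ∀ (t : Int) (lv2 : Option (List Int)) (j2 : Nat),
          1 ≤ t → t ≤ cn - r → (∀ p ∈ caps, r + t ≤ p.2) →
          LInv lv2 j2 (r + t) (caps.filter (fun p => p.2 > r + t)) →
          (if cn ≤ ((out ++ (List.replicate t.toNat (caps.map Prod.fst)).flatten).length : Int)
           then (out ++ (List.replicate t.toNat (caps.map Prod.fst)).flatten).take cn.toNat
           else loopBn cn fuel (caps.filter (fun p => p.2 > r + t))
             (out ++ (List.replicate t.toNat (caps.map Prod.fst)).flatten)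
             ((caps.filter (fun p => p.2 > r + t)).map Prod.fst) lv2 j2 (r + t))
          = loopB cn (cn - r).toNat caps out r := by
        intro t lv2 j2 ht1 htr hdep hinv2
        have hcast : ((t.toNat : Nat) : Int) = t := Int.toNat_of_nonneg (by omega)
        have hlenflat : (((out ++ (List.replicate t.toNat (caps.map Prod.fst)).flatten).length : Nat) : Int)
            = (out.length : Int) + (t.toNat : Nat) * caps.length := by
          simp
        rw [loopB_block cn t.toNat (cn - r).toNat caps out r (by omega) (by omega) hcne hout
          (by intro p hp; rw [hcast]; exact hdep p hp)]
        by_cases hfill : cn ≤ (out.length : Int) + (t.toNat : Nat) * caps.length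
        · rw [if_pos (by rw [hlenflat]; exact hfill), if_pos hfill]
        · have hout' : ((out ++ (List.replicate t.toNat (caps.map Prod.fst)).flatten).length : Int) < cn := by
            rw [hlenflat]; omega
          rw [if_neg (by rw [hlenflat]; exact hfill), if_neg hfill]
          have hcaps' : ∀ p ∈ caps.filter (fun p => p.2 > r + t), r + t < p.2 := by
            intro p hp
            have := List.of_mem_filter hp
            simpa using this
          have hih := ih (caps.filter (fun p => p.2 > r + t))
            (out ++ (List.replicate t.toNat (caps.map Prod.fst)).flatten)
            ((caps.filter (fun p => p.2 > r + t)).map Prod.fst) lv2 j2 (r + t)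
            rfl (by omega) (by omega) hout' hcaps' hinv2
          rw [hih]
          have hfu : (cn - (r + t)).toNat = (cn - r).toNat - t.toNat := by omega
          have hpe : (fun p : String × Int => decide (p.2 > r + ((t.toNat : Nat) : Int)))
              = (fun p : String × Int => decide (p.2 > r + t)) := by
            funext p; rw [hcast]
          rw [hfu, hpe, hcast]
      by_cases hgt : (min (-(PySem.Int.floordiv (-(cn - (out.length : Int))) (caps.length : Int))) (cn - r)) > 1
      · -- block bounded by the next depletion level
        simp only [loopBn, chooseT]
        rw [if_pos ⟨hrc, hcne⟩, if_pos hgt]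
        rw [seq_keep]
        -- name the levels list and establish its facts
        set L := (lv.getD (PySem.List.sorted (PySem.Set.ofList (caps.map Prod.snd)) (fun x => x) false)) with hLdef
        have hLfacts : L.Pairwise (· < ·) ∧ (∀ p ∈ caps, p.2 ∈ L) ∧ (∀ i < j, L.getD i 0 ≤ r) := by
          cases lv with
          | none =>
            refine ⟨PySem.List.sorted_ofList_pairwise_lt _, ?_, ?_⟩
            · intro p hp
              rw [hLdef]
              simp only [Option.getD]
              rw [PySem.List.mem_sorted]
              rw [PySem.Set.mem_ofList]
              exact List.mem_map_of_mem hp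
            · intro i hij
              have : j = 0 := hinv
              omega
          | some L0 =>
            obtain ⟨h1, h2, h3⟩ := hinv
            exact ⟨h1, h2, h3⟩
        obtain ⟨hLsort, hLmem, hLpre⟩ := hLfacts
        have hex : ∃ i, ∃ h : i < L.length, r < L[i] := by
          cases caps with
          | nil => exact absurd rfl hcne
          | cons p rest =>
            have hm := hLmem p (List.mem_cons_self)
            obtain ⟨iv, hivlt, hivEq⟩ := List.mem_iff_getElem.mp hm
            exact ⟨iv, hivlt, by rw [hivEq]; exact hcaps p List.mem_cons_self⟩
        have hadv := advJ_spec L r L.length j hLpre hex (by omega)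
        set j' := advJ L r L.length j with hjdef
        have hmin : ∀ v ∈ L, r < v → L.getD j' 0 ≤ v := by
          intro v hv hrv
          obtain ⟨iv, hivlt, hivEq⟩ := List.mem_iff_getElem.mp hv
          have hij : j' ≤ iv := by
            by_contra hlt
            have hle := hadv.2.2 iv (by omega)
            rw [List.getD_eq_getElem?_getD, List.getElem?_eq_getElem hivlt] at hle
            simp at hle
            omega
          rcases eq_or_lt_of_le hij with he | hl
          · rw [List.getD_eq_getElem?_getD, List.getElem?_eq_getElem hadv.1]
            simp only [Option.getD]
            subst he
            rw [hivEq]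
          · have hpair := List.pairwise_iff_getElem.mp hLsort j' iv hadv.1 hivlt hl
            rw [List.getD_eq_getElem?_getD, List.getElem?_eq_getElem hadv.1]
            simp only [Option.getD]
            rw [hivEq] at hpair
            omega
        have hgj : r < L.getD j' 0 := hadv.2.1
        refine key _ (some L) j' (le_min (by omega) (by omega)) (le_trans (min_le_left _ _) (min_le_right _ _)) ?_ ?_
        · intro p hp
          have h1 := hmin p.2 (hLmem p hp) (hcaps p hp)
          have h2 : min (min (-(PySem.Int.floordiv (-(cn - (out.length : Int))) (caps.length : Int))) (cn - r)) (L.getD j' 0 - r) ≤ L.getD j' 0 - r := min_le_right _ _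
          omega
        · refine ⟨hLsort, ?_, ?_⟩
          · intro p hp
            exact hLmem p (List.mem_of_mem_filter hp)
          · intro i hij'
            have := hadv.2.2 i hij'
            omega
      · -- t = 1 block
        simp only [loopBn, chooseT]
        rw [if_pos ⟨hrc, hcne⟩, if_neg hgt]
        rw [seq_keep]
        have ht0eq : min (-(PySem.Int.floordiv (-(cn - (out.length : Int))) (caps.length : Int))) (cn - r) = 1 := by
          omega
        rw [ht0eq]
        refine key 1 lv j (by omega) (by omega) (by intro p hp; have := hcaps p hp; omega) ?_
        cases lv with
        | none => exact hinv
        | some L0 =>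
          obtain ⟨h1, h2, h3⟩ := hinv
          refine ⟨h1, ?_, ?_⟩
          · intro p hp
            exact h2 p (List.mem_of_mem_filter hp)
          · intro i hij
            have := h3 i hij
            omega
    · -- loop does not run
      simp only [loopBn]
      rw [if_neg hcond]
      by_cases hrc : r < cn
      · have hcaps0 : caps = [] := by
          by_contra hne
          exact hcond ⟨hrc, hne⟩
        rw [hcaps0, loopB_nil]
      · have h0 : (cn - r).toNat = 0 := by omega
        rw [h0]
        rfl

-- ===== VERDICT (by name: the statement is the Claim_ definition above) =====
theorem get_host_ip_list_spec : Claim_equal_get_host_ip_list := by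
  intro hl cn _
  unfold Spec_get_host_ip_list get_host_ip_list get_host_ip_list_alt
  by_cases h : cn ≤ 0
  · rw [Int.toNat_of_nonpos h, if_pos h]
    rfl
  · rw [if_neg h]
    rw [main_eq cn cn.toNat hl [] 0 (by simp; omega), Fcaps_zero hl]
    by_cases hnil : hl.filter (fun p => p.2 > 0) = []
    · have hnil1 : hl.filter (fun p => p.2 > 1) = [] := by
        rw [List.filter_eq_nil_iff] at hnil ⊢
        intro p hp
        have := hnil p hp
        simp at this ⊢
        omega
      rw [hnil, hnil1, loopB_nil]
      rw [if_neg (by simp; omega)]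
      rw [loopBn_nil]
      simp
    · obtain ⟨m, hm⟩ : ∃ m, cn.toNat = m + 1 := ⟨cn.toNat - 1, by omega⟩
      rw [hm]
      have hcond : ((([] : List String).length : Int) < cn && !(hl.filter (fun p => p.2 > 0)).isEmpty) = true := by
        simp [hnil]; omega
      simp only [loopB, hcond, if_true]
      rw [emitB_closed cn (hl.filter (fun p => p.2 > 0)) [] (by simp; omega)]
      by_cases hfill : cn ≤ (([] : List String).length : Int) + (hl.filter (fun p => p.2 > 0)).length
      · rw [if_pos hfill]
        show (([] : List String) ++ (hl.filter (fun p => p.2 > 0)).map Prod.fst).take cn.toNat = _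
        rw [if_pos (by simp at hfill ⊢; omega)]
        simp [hm]
      · rw [if_neg hfill]
        show loopB cn m ((hl.filter (fun p => p.2 > 0)).filter (fun p => p.2 > 0 + 1))
          ([] ++ (hl.filter (fun p => p.2 > 0)).map Prod.fst) (0 + 1) = _
        have hff : (hl.filter (fun p => p.2 > 0)).filter (fun p => p.2 > 0 + 1)
            = hl.filter (fun p => p.2 > 1) := by
          rw [List.filter_filter]
          apply List.filter_congr
          intro p _
          by_cases hp : p.2 > 1
          · have hp0 : p.2 > 0 := by omega
            have hp1 : p.2 > 0 + 1 := by omega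
            simp [hp, hp0]
          · have hp1 : ¬ p.2 > 0 + 1 := by omega
            simp [hp]
        rw [hff, List.nil_append]
        rw [if_neg (by simp at hfill ⊢; omega)]
        have hseq0 : (if (hl.filter (fun p => p.2 > 1)).length
              = ((hl.filter (fun p => p.2 > 0)).map Prod.fst).length
            then (hl.filter (fun p => p.2 > 0)).map Prod.fst
            else (hl.filter (fun p => p.2 > 1)).map Prod.fst)
            = (hl.filter (fun p => p.2 > 1)).map Prod.fst := by
          by_cases hle : (hl.filter (fun p => p.2 > 1)).length
              = ((hl.filter (fun p => p.2 > 0)).map Prod.fst).length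
          · rw [if_pos hle]
            have hsub : List.Sublist (hl.filter (fun p => p.2 > 1)) (hl.filter (fun p => p.2 > 0)) := by
              rw [← hff]
              exact List.filter_sublist
            have heq : hl.filter (fun p => p.2 > 1) = hl.filter (fun p => p.2 > 0) :=
              hsub.eq_of_length (by simpa using hle)
            rw [heq]
          · rw [if_neg hle]
        rw [hseq0]
        rw [bridge cn (m + 1) (hl.filter (fun p => p.2 > 1))
          ((hl.filter (fun p => p.2 > 0)).map Prod.fst)
          ((hl.filter (fun p => p.2 > 1)).map Prod.fst) none 0 1 rfl (by omega) (by omega)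
          (by simp at hfill ⊢; omega)
          (by intro p hp; have := List.of_mem_filter hp; simpa using this) rfl]
        have hm1 : (cn - 1).toNat = m := by omega
        rw [hm1]
        norm_num
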